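-- pv_equiv track=rewrite | github.com/prithikasathivel/COA-Project | coa project.py | cla_adder
-- ===== SOURCE A (Python) =====
-- def cla_adder(A, B):
--     # Initialize lists to store generate (Gi) and propagate (Pi) signals
--     Gi = [0] * 4
--     Pi = [0] * 4
--
--     # Calculate the generate and propagate signals for each bit pair
--     for i in range(4):
--         Gi[i] = A[i] & B[i]
--         Pi[i] = A[i] ^ B[i]
--
--     # Calculate the carry bits for each stage
--     C = [0] * 5  # Initialize the carry bits
--     for i in range(4):
--         C[i + 1] = Gi[i] | (Pi[i] & C[i])
--
--     # Calculate the sum bits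
--     S = [0] * 4
--     for i in range(4):
--         S[i] = A[i] ^ B[i] ^ C[i]
--
--     # The final carry-out is C4
--     Cout = C[4]
--
--     return S, Cout
-- ===== SOURCE B (Python) =====
-- def cla_adder(A, B):
--     # Single-pass ripple adder: one scalar running carry replaces the Gi/Pi/C arrays.
--     S = []
--     carry = 0
--     for i in range(4):
--         a, b = A[i], B[i]
--         S.append(a ^ b ^ carry)
--         carry = (a & b) | ((a ^ b) & carry)
--     return S, carry
-- ===== Notes on version B (the rewrite author's own statement) =====
-- stated objective: simpler
-- what changed: One single-pass loop with a scalar running carry replaces the three separate loops maintaining the Gi, Pi and C arrays.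
import Mathlib
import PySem

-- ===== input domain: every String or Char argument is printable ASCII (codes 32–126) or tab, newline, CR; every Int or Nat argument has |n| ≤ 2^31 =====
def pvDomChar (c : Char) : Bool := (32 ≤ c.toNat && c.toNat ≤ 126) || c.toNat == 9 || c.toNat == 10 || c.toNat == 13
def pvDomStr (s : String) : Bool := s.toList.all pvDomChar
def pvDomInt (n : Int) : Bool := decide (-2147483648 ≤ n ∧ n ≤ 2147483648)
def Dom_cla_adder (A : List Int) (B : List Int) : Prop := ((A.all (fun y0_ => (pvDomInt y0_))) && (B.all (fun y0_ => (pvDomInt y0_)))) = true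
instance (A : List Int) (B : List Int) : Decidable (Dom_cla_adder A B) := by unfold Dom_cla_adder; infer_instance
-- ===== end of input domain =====

-- B replaces A's three loops maintaining Gi/Pi/C arrays by one pass with a scalar running carry (simpler).


-- ===== PORT A =====
-- Indexing uses pyGet? with .getD 0; Pre_cla_adder guarantees every index is in range, so the
-- default is never taken on admitted inputs.
def cla_adder (A : List Int) (B : List Int) : List Int × Int :=
  let Gi : List Int := List.replicate 4 0
  let Pi : List Int := List.replicate 4 0
  let GP := (PySem.List.pyRange 0 4 1).foldl (fun (s : List Int × List Int) i =>
      (s.1.set i.toNat (PySem.Int.band ((PySem.List.pyGet? A i).getD 0) ((PySem.List.pyGet? B i).getD 0)),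
       s.2.set i.toNat (PySem.Int.bxor ((PySem.List.pyGet? A i).getD 0) ((PySem.List.pyGet? B i).getD 0))))
      (Gi, Pi)
  let C : List Int := List.replicate 5 0
  let C := (PySem.List.pyRange 0 4 1).foldl (fun (c : List Int) i =>
      c.set (i.toNat + 1)
        (PySem.Int.bor ((PySem.List.pyGet? GP.1 i).getD 0)
          (PySem.Int.band ((PySem.List.pyGet? GP.2 i).getD 0) ((PySem.List.pyGet? c i).getD 0)))) C
  let S : List Int := List.replicate 4 0
  let S := (PySem.List.pyRange 0 4 1).foldl (fun (s : List Int) i =>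
      s.set i.toNat
        (PySem.Int.bxor (PySem.Int.bxor ((PySem.List.pyGet? A i).getD 0) ((PySem.List.pyGet? B i).getD 0))
          ((PySem.List.pyGet? C i).getD 0))) S
  (S, (PySem.List.pyGet? C 4).getD 0)

-- ===== PORT B =====
def cla_adder_alt (A : List Int) (B : List Int) : List Int × Int :=
  (PySem.List.pyRange 0 4 1).foldl (fun (s : List Int × Int) i =>
      let a := (PySem.List.pyGet? A i).getD 0
      let b := (PySem.List.pyGet? B i).getD 0
      (s.1 ++ [PySem.Int.bxor (PySem.Int.bxor a b) s.2],
       PySem.Int.bor (PySem.Int.band a b) (PySem.Int.band (PySem.Int.bxor a b) s.2)))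
    ([], 0)

-- ===== PRECONDITION & SPEC =====
-- Pre_ excludes exactly the inputs where the Python A raises IndexError (fewer than 4 elements).
def Pre_cla_adder (A : List Int) (B : List Int) : Prop := 4 ≤ A.length ∧ 4 ≤ B.length
instance (A : List Int) (B : List Int) : Decidable (Pre_cla_adder A B) := by unfold Pre_cla_adder; infer_instance
def pvWitness_cla_adder : List Int × List Int := ([1, 0, 1, 1], [0, 1, 1, 0])

def Spec_cla_adder (A : List Int) (B : List Int) (out : List Int × Int) : Prop := out = cla_adder_alt A B
instance (A : List Int) (B : List Int) (out : List Int × Int) : Decidable (Spec_cla_adder A B out) := by unfold Spec_cla_adder; infer_instance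

-- ===== CLAIM (what is proved, stated in full; the proofs are below) =====
def Claim_equal_cla_adder : Prop := ∀ (A : List Int) (B : List Int), Dom_cla_adder A B → Pre_cla_adder A B → Spec_cla_adder A B (cla_adder A B)

-- ===== LEMMAS AND PROOFS =====

-- ===== VERDICT (by name: the statement is the Claim_ definition above) =====
theorem cla_adder_spec : Claim_equal_cla_adder := by
  intro A B _ hpre
  obtain ⟨hA, hB⟩ := hpre
  rcases A with _ | ⟨a0, _ | ⟨a1, _ | ⟨a2, _ | ⟨a3, At⟩⟩⟩⟩ <;>
    simp only [List.length_nil, List.length_cons] at hA <;> try omega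
  rcases B with _ | ⟨b0, _ | ⟨b1, _ | ⟨b2, _ | ⟨b3, Bt⟩⟩⟩⟩ <;>
    simp only [List.length_nil, List.length_cons] at hB <;> try omega
  rfl
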